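-- pv_equiv track=rewrite | github.com/matthewdgreen/decipher | src/analysis/transformers.py | _interleave_orders
-- ===== SOURCE A (Python) =====
-- def _interleave_orders(
--     first: list[tuple[int, int]],
--     second: list[tuple[int, int]],
-- ) -> list[tuple[int, int]]:
--     seen: set[tuple[int, int]] = set()
--     out: list[tuple[int, int]] = []
--     for i in range(max(len(first), len(second))):
--         for order in (first, second):
--             if i >= len(order):
--                 continue
--             cell = order[i]
--             if cell in seen:
--                 continue
--             seen.add(cell)
--             out.append(cell)
--     return out
-- ===== SOURCE B (Python) =====
-- def _riffle(first, second):
--     if not first: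
--         return list(second)
--     if not second:
--         return list(first)
--     return [first[0], second[0]] + _riffle(first[1:], second[1:])
--
--
-- def _interleave_orders(
--     first: list[tuple[int, int]],
--     second: list[tuple[int, int]],
-- ) -> list[tuple[int, int]]:
--     return list(dict.fromkeys(_riffle(first, second)))
-- ===== Notes on version B (the rewrite author's own statement) =====
-- stated objective: alternative
-- what changed: Replaces the fused index loop with a seen-set by a two-stage pipeline: a recursive riffle builds the full interleaved sequence, then dict.fromkeys deduplicates it preserving first occurrence.
import Mathlib
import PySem

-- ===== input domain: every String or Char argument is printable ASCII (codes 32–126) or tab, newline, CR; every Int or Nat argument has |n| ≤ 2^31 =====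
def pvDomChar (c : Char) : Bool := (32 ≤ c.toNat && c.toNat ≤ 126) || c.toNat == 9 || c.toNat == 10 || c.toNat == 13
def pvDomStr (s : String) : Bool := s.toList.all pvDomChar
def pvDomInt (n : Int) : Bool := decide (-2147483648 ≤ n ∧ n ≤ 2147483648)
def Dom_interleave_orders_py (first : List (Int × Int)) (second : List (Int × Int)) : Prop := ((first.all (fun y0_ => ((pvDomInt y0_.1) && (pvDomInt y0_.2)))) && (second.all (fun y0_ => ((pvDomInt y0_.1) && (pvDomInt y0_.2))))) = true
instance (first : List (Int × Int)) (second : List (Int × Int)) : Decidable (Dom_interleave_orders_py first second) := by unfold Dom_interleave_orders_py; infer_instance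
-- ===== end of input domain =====

-- B replaces A's fused index loop with a two-stage pipeline (riffle, then first-occurrence dedup); objective: alternative decomposition.

-- ===== PORT A =====
-- literal port of A: fold over range(max(len,len)), inner loop over (first, second),
-- a seen-set and an output list; the `match` on pyGet? is total only because the
-- length guard already skipped out-of-range indices (Python never raises here).
def interleave_orders_py (first : List (Int × Int)) (second : List (Int × Int)) : List (Int × Int) :=
  ((PySem.List.pyRange 0 (max (first.length : Int) (second.length : Int)) 1).foldl
    (fun st i =>
      [first, second].foldl (fun st order =>
        if (order.length : Int) ≤ i then st
        else
          match PySem.List.pyGet? order i with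
          | none => st
          | some cell =>
            if st.1.contains cell then st
            else (PySem.Set.add st.1 cell, st.2 ++ [cell])) st)
    ((PySem.Set.empty : PySem.Set (Int × Int)), ([] : List (Int × Int)))).2

-- ===== PORT B =====
-- Source B's recursive _riffle
def pvRiffle : List (Int × Int) → List (Int × Int) → List (Int × Int)
  | [], s => s
  | f, [] => f
  | x :: xs, y :: ys => x :: y :: pvRiffle xs ys

-- list(dict.fromkeys(...)) is PySem.List.dedup
def interleave_orders_py_alt (first : List (Int × Int)) (second : List (Int × Int)) : List (Int × Int) :=
  PySem.List.dedup (pvRiffle first second)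

-- ===== PRECONDITION & SPEC =====
def Spec_interleave_orders_py (first : List (Int × Int)) (second : List (Int × Int)) (out : List (Int × Int)) : Prop := out = interleave_orders_py_alt first second
instance (first : List (Int × Int)) (second : List (Int × Int)) (out : List (Int × Int)) : Decidable (Spec_interleave_orders_py first second out) := by unfold Spec_interleave_orders_py; infer_instance

-- ===== CLAIM (what is proved, stated in full; the proofs are below) =====
def Claim_equal_interleave_orders_py : Prop := ∀ (first : List (Int × Int)) (second : List (Int × Int)), Dom_interleave_orders_py first second → Spec_interleave_orders_py first second (interleave_orders_py first second)

-- ===== LEMMAS AND PROOFS =====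

-- fold congruence on members (own helper with explicit argument order)
theorem pv_foldl_congr {σ α : Type} (l : List α) (f g' : σ → α → σ) (init : σ)
    (h : ∀ acc x, x ∈ l → f acc x = g' acc x) : l.foldl f init = l.foldl g' init := by
  induction l generalizing init with
  | nil => rfl
  | cons a t ih =>
    rw [List.foldl_cons, List.foldl_cons, h init a List.mem_cons_self]
    exact ih (g' init a) (fun acc x hx => h acc x (List.mem_cons_of_mem a hx))

-- a fold over pyRange 0 n 1 is a fold over List.range n with cast indices
theorem pv_foldl_range_shape {σ : Type} (F : σ → Int → σ) (n : Nat) (st0 : σ) :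
    (PySem.List.pyRange 0 (n : Int) 1).foldl F st0
      = (List.range n).foldl (fun st k => F st ((k : Nat) : Int)) st0 := by
  rw [PySem.List.pyRange_one, show (((n : Int) - 0).toNat) = n by omega, List.foldl_map]
  exact pv_foldl_congr _ _ _ _ (by intro acc k _; simp)

-- single-list version: an index loop over range(len(L)) folds g over L
theorem pv_singleNat {σ : Type} (g : σ → (Int × Int) → σ) :
    ∀ (L : List (Int × Int)) (st0 : σ),
      (List.range L.length).foldl (fun st k =>
        match PySem.List.pyGet? L ((k : Nat) : Int) with
        | none => st
        | some c => g st c) st0 = L.foldl g st0 := by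
  intro L
  induction L with
  | nil => intro st0; rfl
  | cons x xs ih =>
    intro st0
    rw [List.length_cons, List.range_succ_eq_map, List.foldl_cons, List.foldl_map]
    have hc := pv_foldl_congr (List.range xs.length)
      (fun (st : σ) (k : Nat) =>
        match PySem.List.pyGet? (x :: xs) ((k.succ : Nat) : Int) with
        | none => st
        | some c => g st c)
      (fun (st : σ) (k : Nat) =>
        match PySem.List.pyGet? xs ((k : Nat) : Int) with
        | none => st
        | some c => g st c)
      (match PySem.List.pyGet? (x :: xs) ((0 : Nat) : Int) with
        | none => st0
        | some c => g st0 c)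
      (by
        intro acc k _
        simp only [PySem.List.pyGet?_natCast, List.getElem?_cons_succ])
    rw [hc]
    have h0 : (match PySem.List.pyGet? (x :: xs) ((0 : Nat) : Int) with
        | none => st0
        | some c => g st0 c) = g st0 x := by
      rw [PySem.List.pyGet?_natCast]; rfl
    rw [h0, List.foldl_cons]
    exact ih (g st0 x)

-- shorthand for A's inner two-list pass at index i
def pvInner {σ : Type} (g : σ → (Int × Int) → σ)
    (f s : List (Int × Int)) (st : σ) (i : Int) : σ :=
  [f, s].foldl (fun st order =>
    if (order.length : Int) ≤ i then st
    else
      match PySem.List.pyGet? order i with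
      | none => st
      | some cell => g st cell) st

-- A's index loop, generic in the state-update g, equals a fold of g over the riffle.
theorem pv_range_fold_eq_riffle_fold {σ : Type} (g : σ → (Int × Int) → σ) :
    ∀ (f s : List (Int × Int)) (st0 : σ),
      (PySem.List.pyRange 0 (max (f.length : Int) (s.length : Int)) 1).foldl
        (pvInner g f s) st0
      = (pvRiffle f s).foldl g st0 := by
  intro f
  induction f with
  | nil =>
    intro s st0
    rw [show (max ((List.nil (α := Int × Int)).length : Int) (s.length : Int))
          = ((s.length : Nat) : Int) by simp]
    rw [pv_foldl_range_shape]
    have hc := pv_foldl_congr (List.range s.length)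
      (fun (st : σ) (k : Nat) => pvInner g [] s st ((k : Nat) : Int))
      (fun (st : σ) (k : Nat) =>
        match PySem.List.pyGet? s ((k : Nat) : Int) with
        | none => st
        | some c => g st c)
      st0
      (by
        intro acc k hk
        rw [List.mem_range] at hk
        simp only [pvInner, List.foldl_cons, List.foldl_nil, List.length_nil, Nat.cast_zero]
        rw [if_neg (by exact_mod_cast Nat.not_le.mpr hk), if_pos (Int.natCast_nonneg k)])
    rw [hc]
    exact pv_singleNat g s st0
  | cons x xs ih =>
    intro s st0
    cases s with
    | nil =>
      rw [show (max (((x :: xs).length : Nat) : Int) ((List.nil (α := Int × Int)).length : Int))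
            = (((x :: xs).length : Nat) : Int) by simp; positivity]
      rw [pv_foldl_range_shape]
      have hc := pv_foldl_congr (List.range (x :: xs).length)
        (fun (st : σ) (k : Nat) => pvInner g (x :: xs) [] st ((k : Nat) : Int))
        (fun (st : σ) (k : Nat) =>
          match PySem.List.pyGet? (x :: xs) ((k : Nat) : Int) with
          | none => st
          | some c => g st c)
        st0
        (by
          intro acc k hk
          rw [List.mem_range] at hk
          simp only [pvInner, List.foldl_cons, List.foldl_nil, List.length_nil, Nat.cast_zero]
          rw [if_pos (Int.natCast_nonneg k), if_neg (by exact_mod_cast Nat.not_le.mpr hk)])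
      rw [hc]
      exact pv_singleNat g (x :: xs) st0
    | cons y ys =>
      rw [show (max (((x :: xs).length : Nat) : Int) (((y :: ys).length : Nat) : Int))
            = (((max xs.length ys.length + 1 : Nat) : Nat) : Int) by
          simp only [List.length_cons]; omega]
      rw [pv_foldl_range_shape]
      rw [List.range_succ_eq_map, List.foldl_cons, List.foldl_map]
      have hhead : pvInner g (x :: xs) (y :: ys) st0 (((0 : Nat) : Nat) : Int)
          = g (g st0 x) y := by
        simp only [pvInner, List.foldl_cons, List.foldl_nil, List.length_cons]
        rw [if_neg (show ¬(((ys.length + 1 : Nat) : Int) ≤ (((0 : Nat) : Nat) : Int)) by omega),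
          if_neg (show ¬(((xs.length + 1 : Nat) : Int) ≤ (((0 : Nat) : Nat) : Int)) by omega)]
        simp only [PySem.List.pyGet?_natCast, List.getElem?_cons_zero]
      rw [hhead]
      have hc := pv_foldl_congr (List.range (max xs.length ys.length))
        (fun (st : σ) (k : Nat) => pvInner g (x :: xs) (y :: ys) st ((k.succ : Nat) : Int))
        (fun (st : σ) (k : Nat) => pvInner g xs ys st ((k : Nat) : Int))
        (g (g st0 x) y)
        (by
          intro acc k _
          simp only [pvInner, List.foldl_cons, List.foldl_nil, PySem.List.pyGet?_natCast,
            List.getElem?_cons_succ, List.length_cons]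
          have hxiff : (((xs.length + 1 : Nat) : Int) ≤ ((k.succ : Nat) : Int))
              ↔ (((xs.length : Nat) : Int) ≤ ((k : Nat) : Int)) := by omega
          have hyiff : (((ys.length + 1 : Nat) : Int) ≤ ((k.succ : Nat) : Int))
              ↔ (((ys.length : Nat) : Int) ≤ ((k : Nat) : Int)) := by omega
          by_cases hy : (((ys.length : Nat) : Int) ≤ ((k : Nat) : Int))
          · rw [if_pos (hyiff.mpr hy), if_pos hy]
            by_cases hx : (((xs.length : Nat) : Int) ≤ ((k : Nat) : Int))
            · rw [if_pos (hxiff.mpr hx), if_pos hx]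
            · rw [if_neg (fun c => hx (hxiff.mp c)), if_neg hx]
          · rw [if_neg (fun c => hy (hyiff.mp c)), if_neg hy]
            by_cases hx : (((xs.length : Nat) : Int) ≤ ((k : Nat) : Int))
            · rw [if_pos (hxiff.mpr hx), if_pos hx]
            · rw [if_neg (fun c => hx (hxiff.mp c)), if_neg hx])
      rw [hc]
      have hxs := ih ys (g (g st0 x) y)
      rw [show (max ((xs.length : Nat) : Int) ((ys.length : Nat) : Int))
            = (((max xs.length ys.length : Nat) : Nat) : Int) by omega] at hxs
      rw [pv_foldl_range_shape] at hxs
      exact hxs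

-- a fold of A's dedup step from a duplicated state is a duplicated Set.add fold
theorem pv_dedup_fold (L : List (Int × Int)) :
    ∀ (s : PySem.Set (Int × Int)),
      L.foldl (fun (st : PySem.Set (Int × Int) × List (Int × Int)) c =>
          if st.1.contains c then st else (PySem.Set.add st.1 c, st.2 ++ [c])) (s, s)
      = (L.foldl PySem.Set.add s, L.foldl PySem.Set.add s) := by
  induction L with
  | nil => intro s; rfl
  | cons c t ih =>
    intro s
    by_cases h : PySem.Set.contains s c = true
    · have hc : c ∈ s := by simpa using h
      simp only [List.foldl, h, if_pos]
      have hadd : PySem.Set.add s c = s := by simp [PySem.Set.add, hc]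
      rw [hadd]
      exact ih s
    · simp only [Bool.not_eq_true] at h
      have hc : c ∉ s := by simpa using h
      have h' : PySem.Set.contains s c = false := by simpa using hc
      simp only [List.foldl, h', Bool.false_eq_true, if_false]
      have hadd : PySem.Set.add s c = s ++ [c] := by simp [PySem.Set.add, hc]
      rw [hadd]
      exact ih (s ++ [c])

-- ===== VERDICT (by name: the statement is the Claim_ definition above) =====
theorem interleave_orders_py_spec : Claim_equal_interleave_orders_py := by
  intro first second _
  unfold Spec_interleave_orders_py interleave_orders_py interleave_orders_py_alt
  rw [show (fun (st : PySem.Set (Int × Int) × List (Int × Int)) (i : Int) =>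
      [first, second].foldl (fun st order =>
        if (order.length : Int) ≤ i then st
        else
          match PySem.List.pyGet? order i with
          | none => st
          | some cell =>
            if st.1.contains cell then st
            else (PySem.Set.add st.1 cell, st.2 ++ [cell])) st)
      = pvInner (fun st cell =>
          if st.1.contains cell then st
          else (PySem.Set.add st.1 cell, st.2 ++ [cell])) first second from rfl]
  rw [pv_range_fold_eq_riffle_fold]
  have h := pv_dedup_fold (pvRiffle first second) PySem.Set.empty
  simp only [PySem.Set.empty] at h ⊢
  rw [h]
  simp [PySem.List.dedup_eq_ofList, PySem.Set.ofList_eq_foldl]
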